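-- pv_equiv track=rewrite | github.com/Rut092/DSA-SHEET-CHALLENGE | 1482-minimum-number-of-days-to-make-m-bouquets/1482-minimum-number-of-days-to-make-m-bouquets.py | total_boquets
-- ===== SOURCE A (Python) =====
-- def total_boquets(value,bloomDay,flowers):
--     boquets_count = count_flower = 0
--
--     for flo in bloomDay:
--         if flo<=value:
--             count_flower+=1
--             if count_flower%flowers==0:
--                 boquets_count+=1
--                 count_flower=0
--         else:
--             count_flower=0
--
--     return boquets_count
-- ===== SOURCE B (Python) =====
-- def total_boquets(value, bloomDay, flowers):
--     # Stage 1: indices of flowers that have NOT bloomed by `value` ("walls").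
--     walls = [i for i, f in enumerate(bloomDay) if f > value]
--     # Stage 2: each maximal bloomed run lies strictly between two consecutive
--     # bounds; its length is hi - lo - 1, contributing (hi - lo - 1) // flowers.
--     bounds = [-1] + walls + [len(bloomDay)]
--     return sum((hi - lo - 1) // flowers for lo, hi in zip(bounds, bounds[1:]))
-- ===== Notes on version B (the rewrite author's own statement) =====
-- stated objective: alternative
-- what changed: B first materialises the list of indices of non-bloomed flowers (walls), then computes the answer arithmetically as a sum of (hi-lo-1)//flowers over consecutive bound pairs, instead of A's element-by-element counter with modulo test and reset.
-- outside the precondition, e.g. on total_boquets(5, [1, 2, 3], -1): A returns 3, B returns -3; on total_boquets(5, [], 0): A returns 0, B raises ZeroDivisionError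
import Mathlib
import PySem

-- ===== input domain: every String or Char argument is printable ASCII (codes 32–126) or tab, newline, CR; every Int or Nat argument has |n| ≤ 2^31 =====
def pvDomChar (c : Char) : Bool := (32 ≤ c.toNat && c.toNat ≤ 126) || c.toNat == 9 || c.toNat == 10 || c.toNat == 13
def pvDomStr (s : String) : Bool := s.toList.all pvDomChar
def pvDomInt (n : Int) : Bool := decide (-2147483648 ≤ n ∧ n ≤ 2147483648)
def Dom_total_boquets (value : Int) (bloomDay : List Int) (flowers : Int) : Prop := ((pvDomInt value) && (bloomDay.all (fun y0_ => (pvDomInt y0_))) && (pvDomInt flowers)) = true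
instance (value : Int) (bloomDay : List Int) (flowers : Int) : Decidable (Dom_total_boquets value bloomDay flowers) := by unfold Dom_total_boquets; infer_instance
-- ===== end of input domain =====

-- B replaces A's per-element counter with modulo test and reset by a staged computation:
-- first the list of wall indices (non-bloomed flowers), then a sum of (hi-lo-1)//flowers
-- over consecutive bound pairs (objective: alternative decomposition, same cost).

-- ===== PORT A =====
-- state = (boquets_count, count_flower)
def total_boquets_step (value flowers : Int) (s : Int × Int) (flo : Int) : Int × Int :=
  if flo ≤ value then
    let c := s.2 + 1
    if PySem.Int.mod c flowers = 0 then (s.1 + 1, 0) else (s.1, c)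
  else (s.1, 0)

def total_boquets (value : Int) (bloomDay : List Int) (flowers : Int) : Int :=
  (bloomDay.foldl (total_boquets_step value flowers) (0, 0)).1

-- ===== PORT B =====
-- walls = [i for i, f in enumerate(bloomDay) if f > value]
-- bounds = [-1] + walls + [len(bloomDay)];  bounds[1:] ported as List.drop 1 (exact)
-- sum over zip(bounds, bounds[1:]) of (hi - lo - 1) // flowers
def total_boquets_alt (value : Int) (bloomDay : List Int) (flowers : Int) : Int :=
  let walls := ((PySem.List.enumerate bloomDay 0).filter (fun p => value < p.2)).map (fun p => p.1)
  let bounds := -1 :: walls ++ [(bloomDay.length : Int)]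
  (bounds.zip (bounds.drop 1)).foldl
    (fun acc p => acc + PySem.Int.floordiv (p.2 - p.1 - 1) flowers) 0

-- ===== PRECONDITION & SPEC =====
-- Pre_ restricts to the natural domain of a positive bouquet size: flowers == 0 raises
-- ZeroDivisionError (in A as soon as a flower qualifies, in B always), and for negative
-- flowers A's modulo-with-negative-divisor bouquet count is an implementation artefact
-- that neither caller would specify (cites in claim.json).
def Pre_total_boquets (value : Int) (bloomDay : List Int) (flowers : Int) : Prop := 1 ≤ flowers
instance (value : Int) (bloomDay : List Int) (flowers : Int) : Decidable (Pre_total_boquets value bloomDay flowers) := by unfold Pre_total_boquets; infer_instance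
def pvWitness_total_boquets : Int × List Int × Int := (5, [1, 7, 2, 3, 9, 4], 2)

def Spec_total_boquets (value : Int) (bloomDay : List Int) (flowers : Int) (out : Int) : Prop := out = total_boquets_alt value bloomDay flowers
instance (value : Int) (bloomDay : List Int) (flowers : Int) (out : Int) : Decidable (Spec_total_boquets value bloomDay flowers out) := by unfold Spec_total_boquets; infer_instance

-- ===== CLAIM (what is proved, stated in full; the proofs are below) =====
def Claim_equal_total_boquets : Prop := ∀ (value : Int) (bloomDay : List Int) (flowers : Int), Dom_total_boquets value bloomDay flowers → Pre_total_boquets value bloomDay flowers → Spec_total_boquets value bloomDay flowers (total_boquets value bloomDay flowers)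

-- ===== LEMMAS AND PROOFS =====

-- Proof-only middle layer: the run fold (total, current run length).
def pvRunStep (value flowers : Int) (s : Int × Int) (f : Int) : Int × Int :=
  if f ≤ value then (s.1, s.2 + 1)
  else (s.1 + PySem.Int.floordiv s.2 flowers, 0)

-- Proof-only: B's zip-sum over a bounds list.
def pvZipSum (flowers : Int) (bs : List Int) : Int :=
  (bs.zip (bs.drop 1)).foldl
    (fun acc p => acc + PySem.Int.floordiv (p.2 - p.1 - 1) flowers) 0

lemma pvZipSum_cons₂ (fl a b : Int) (L : List Int) :
    pvZipSum fl (a :: b :: L) = PySem.Int.floordiv (b - a - 1) fl + pvZipSum fl (b :: L) := by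
  unfold pvZipSum
  simp only [List.drop_succ_cons, List.drop_zero, List.zip_cons_cons, List.foldl_cons]
  rw [PySem.List.foldl_add (g := fun p : Int × Int => PySem.Int.floordiv (p.2 - p.1 - 1) fl),
      PySem.List.foldl_add (g := fun p : Int × Int => PySem.Int.floordiv (p.2 - p.1 - 1) fl)]
  ring

-- Stage 1: A's fold equals the run fold (invariant on A's state).
lemma total_boquets_key (value fl : Int) (hfl : 1 ≤ fl) :
    ∀ (bd : List Int) (t r : Int), 0 ≤ r →
      (bd.foldl (total_boquets_step value fl) (t + r / fl, r % fl)).1 =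
      (let s := bd.foldl (pvRunStep value fl) (t, r)
       s.1 + PySem.Int.floordiv s.2 fl) := by
  intro bd
  induction bd with
  | nil =>
    intro t r hr
    simp [PySem.Int.floordiv_eq_ediv_of_pos (a := r) (by omega : (0:Int) < fl)]
  | cons f bd ih =>
    intro t r hr
    by_cases hf : f ≤ value
    · have hm0 : 0 ≤ r % fl := Int.emod_nonneg r (by omega)
      have hm1 : r % fl < fl := Int.emod_lt_of_pos r (by omega)
      have hsum : fl * (r / fl) + r % fl = r := Int.ediv_add_emod r fl
      simp only [List.foldl_cons, total_boquets_step, pvRunStep, if_pos hf]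
      rw [PySem.Int.mod_eq_emod_of_pos (a := r % fl + 1) (by omega : (0:Int) < fl)]
      by_cases hwrap : r % fl + 1 = fl
      · have hmod : (r % fl + 1) % fl = 0 := by rw [hwrap]; simp
        have hexp : fl * (r / fl + 1) = fl * (r / fl) + fl := by ring
        have h := Int.ediv_emod_unique (a := r + 1) (b := fl) (r := 0) (q := r / fl + 1)
          (by omega : (0:Int) < fl)
        have hq : (r + 1) / fl = r / fl + 1 := (h.mpr ⟨by omega, by omega, by omega⟩).1
        have hm : (r + 1) % fl = 0 := (h.mpr ⟨by omega, by omega, by omega⟩).2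
        rw [if_pos hmod]
        have := ih (t := t) (r := r + 1) (by omega)
        rw [hq, hm] at this
        simpa [add_assoc] using this
      · have hmod : (r % fl + 1) % fl = r % fl + 1 :=
          Int.emod_eq_of_lt (by omega) (by omega)
        rw [if_neg (by omega : ¬ (r % fl + 1) % fl = 0)]
        have hq : (r + 1) / fl = r / fl := by
          have h := Int.ediv_emod_unique (a := r + 1) (b := fl) (r := r % fl + 1) (q := r / fl)
            (by omega : (0:Int) < fl)
          exact (h.mpr ⟨by omega, by omega, by omega⟩).1
        have hm : (r + 1) % fl = r % fl + 1 := by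
          have h := Int.ediv_emod_unique (a := r + 1) (b := fl) (r := r % fl + 1) (q := r / fl)
            (by omega : (0:Int) < fl)
          exact (h.mpr ⟨by omega, by omega, by omega⟩).2
        have := ih (t := t) (r := r + 1) (by omega)
        rw [hq, hm] at this
        simpa using this
    · simp only [List.foldl_cons, total_boquets_step, pvRunStep, if_neg hf]
      have := ih (t := t + PySem.Int.floordiv r fl) (r := 0) (by omega)
      rw [PySem.Int.floordiv_eq_ediv_of_pos (a := r) (by omega : (0:Int) < fl)] at this ⊢
      simpa using this

-- Stage 2: the run fold equals B's zip-sum over the bounds list, for any enumerate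
-- start s, with the pending run of length r encoded as a first bound of s - 1 - r.
lemma pvRun_eq_zipSum (value fl : Int) :
    ∀ (bd : List Int) (s t r : Int),
      (let st := bd.foldl (pvRunStep value fl) (t, r)
       st.1 + PySem.Int.floordiv st.2 fl) =
      t + pvZipSum fl ((s - 1 - r) ::
        ((((PySem.List.enumerate bd s).filter (fun p => value < p.2)).map (fun p => p.1))
         ++ [s + (bd.length : Int)])) := by
  intro bd
  induction bd with
  | nil =>
    intro s t r
    simp only [List.foldl_nil, PySem.List.enumerate_nil, List.filter_nil, List.map_nil,
      List.length_nil, Int.natCast_zero, List.nil_append]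
    have h : pvZipSum fl [s - 1 - r, s + 0] = PySem.Int.floordiv r fl := by
      simp only [pvZipSum, List.drop_succ_cons, List.drop_zero, List.zip_cons_cons,
        List.zip_nil_right, List.foldl_cons, List.foldl_nil, zero_add]
      congr 1
      ring
    rw [h]
  | cons f bd ih =>
    intro s t r
    rw [PySem.List.enumerate_cons]
    have hlen : s + ((bd.length + 1 : Nat) : Int) = s + 1 + (bd.length : Int) := by
      push_cast; ring
    by_cases hf : f ≤ value
    · have hfilt : ¬ value < f := by omega
      simp only [List.foldl_cons, pvRunStep, if_pos hf, List.filter_cons, hfilt,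
        decide_false, Bool.false_eq_true, if_false, List.length_cons]
      have hih := ih (s := s + 1) (t := t) (r := r + 1)
      have harith : s + 1 - 1 - (r + 1) = s - 1 - r := by ring
      rw [harith] at hih
      rw [hlen]
      exact hih
    · have hfilt : value < f := by omega
      simp only [List.foldl_cons, pvRunStep, if_neg hf, List.filter_cons, hfilt,
        decide_true, if_true, List.map_cons, List.length_cons]
      have hih := ih (s := s + 1) (t := t + PySem.Int.floordiv r fl) (r := 0)
      have harith : s + 1 - 1 - (0:Int) = s := by ring
      rw [harith] at hih
      rw [List.cons_append, pvZipSum_cons₂, hlen]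
      have hgap : s - (s - 1 - r) - 1 = r := by ring
      rw [hgap, hih]
      ring

-- ===== VERDICT (by name: the statement is the Claim_ definition above) =====
theorem total_boquets_spec : Claim_equal_total_boquets := by
  intro value bloomDay flowers _ hpre
  unfold Spec_total_boquets total_boquets total_boquets_alt
  have h1 := total_boquets_key value flowers hpre bloomDay 0 0 (le_refl 0)
  have h2 := pvRun_eq_zipSum value flowers bloomDay 0 0 0
  simp only [show (0:Int) - 1 - 0 = -1 by ring, zero_add] at h2
  simp only [zero_add, Int.zero_ediv, Int.zero_emod] at h1
  rw [h1, h2]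
  rfl
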